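-- pv_equiv track=rewrite | github.com/hovanhoa/caro-ai | main.py | CheckCandidateMove
-- ===== SOURCE A (Python) =====
-- def CheckOutOfBounds(move, N, M):
--     if move[0] >= N or move[0] < 0 or move[1] >= M or move[1] < 0:
--         return True
--     return False
--
-- def CheckCandidateMove(board, move, N, M, border_max_size):
--     # if move is unavailable
--     if board[move[0]][move[1]] != " ":
--         return False
--     # look for checker in size 2 proximity matrix
--     for border_size in range(1, border_max_size):
--         # vertical search
--         for i in range(move[0] - border_size, move[0] + border_size + 1):
--             for direction in [-1, 1]:
--                 if not CheckOutOfBounds((i, move[1] + direction * border_size), N, M):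
--                     if board[i][move[1] + direction * border_size] != " ":
--                         return True
--         # horizontal search
--         for j in range(move[1] - border_size + 1, move[1] + border_size):
--             for direction in [-1, 1]:
--                 if not CheckOutOfBounds((move[0] + direction * border_size, j), N, M):
--                     if board[move[0] + direction * border_size][j] != " ":
--                         return True
--     # False if no checker was found in 2-proximity
--     return False
-- ===== SOURCE B (Python) =====
-- def CheckOutOfBounds(move, N, M):
--     if move[0] >= N or move[0] < 0 or move[1] >= M or move[1] < 0:
--         return True
--     return False
--
-- def CheckCandidateMove(board, move, N, M, border_max_size):
--     # if move is unavailable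
--     if board[move[0]][move[1]] != " ":
--         return False
--     # single flat scan of the solid (2r+1) x (2r+1) square around the move
--     r = border_max_size - 1
--     for di in range(-r, r + 1):
--         for dj in range(-r, r + 1):
--             if di == 0 and dj == 0:
--                 continue
--             i, j = move[0] + di, move[1] + dj
--             if not CheckOutOfBounds((i, j), N, M) and board[i][j] != " ":
--                 return True
--     return False
-- ===== Notes on version B (the rewrite author's own statement) =====
-- stated objective: simpler
-- what changed: A's expanding ring-by-ring perimeter scan (per-distance vertical and horizontal edge loops with a direction list) is collapsed into one flat double loop over the solid (2r+1)x(2r+1) square around the move, skipping the centre.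
-- outside the precondition, e.g. on CheckCandidateMove([[' '], [' ', ' ', ' '], ['x', ' ']], (2, -1), 4, 4, 3): A returns True, B raises IndexError
import Mathlib
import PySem

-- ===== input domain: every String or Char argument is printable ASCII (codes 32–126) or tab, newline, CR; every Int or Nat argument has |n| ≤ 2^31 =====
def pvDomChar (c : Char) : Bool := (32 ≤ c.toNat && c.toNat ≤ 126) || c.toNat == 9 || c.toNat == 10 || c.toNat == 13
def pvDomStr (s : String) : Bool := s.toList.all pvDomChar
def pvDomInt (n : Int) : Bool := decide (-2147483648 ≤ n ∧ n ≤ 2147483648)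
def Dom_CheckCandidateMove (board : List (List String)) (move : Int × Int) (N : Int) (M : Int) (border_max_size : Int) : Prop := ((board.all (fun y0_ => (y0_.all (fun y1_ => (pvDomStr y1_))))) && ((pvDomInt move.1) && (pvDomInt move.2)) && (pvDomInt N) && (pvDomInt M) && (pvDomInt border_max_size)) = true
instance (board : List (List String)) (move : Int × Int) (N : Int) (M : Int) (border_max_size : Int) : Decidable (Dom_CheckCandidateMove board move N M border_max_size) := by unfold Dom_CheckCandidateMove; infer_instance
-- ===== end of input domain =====

-- B collapses A's ring-by-ring perimeter scan into one flat double loop over the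
-- solid square around the move (same cells, simpler decomposition; no speed claim).


-- ===== PORT A =====
-- shared helper: CheckOutOfBounds from the Python module
def pvCheckOutOfBounds (move : Int × Int) (N : Int) (M : Int) : Bool :=
  if move.1 ≥ N || move.1 < 0 || move.2 ≥ M || move.2 < 0 then true else false

-- board[i][j]; the default " " is only reached where Python would raise IndexError
-- (excluded by Pre_CheckCandidateMove)
def pvCell (board : List (List String)) (i : Int) (j : Int) : String :=
  (PySem.List.pyGet? ((PySem.List.pyGet? board i).getD []) j).getD " "

-- A's scan: for border_size in range(1, bms): vertical edges then horizontal edges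
def pvScanA (board : List (List String)) (m0 m1 N M bms : Int) : Bool :=
  (PySem.List.pyRange 1 bms 1).any (fun b =>
    ((PySem.List.pyRange (m0 - b) (m0 + b + 1) 1).any (fun i =>
      ([-1, 1] : List Int).any (fun d =>
        !pvCheckOutOfBounds (i, m1 + d * b) N M && decide (pvCell board i (m1 + d * b) ≠ " "))))
    ||
    ((PySem.List.pyRange (m1 - b + 1) (m1 + b) 1).any (fun j =>
      ([-1, 1] : List Int).any (fun d =>
        !pvCheckOutOfBounds (m0 + d * b, j) N M && decide (pvCell board (m0 + d * b) j ≠ " ")))))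

def CheckCandidateMove (board : List (List String)) (move : Int × Int) (N : Int) (M : Int) (border_max_size : Int) : Bool :=
  if decide (pvCell board move.1 move.2 ≠ " ") then false
  else pvScanA board move.1 move.2 N M border_max_size

-- ===== PORT B =====
-- B's scan: one flat double loop over the solid square, skipping the centre
def pvScanB (board : List (List String)) (m0 m1 N M bms : Int) : Bool :=
  (PySem.List.pyRange (-(bms - 1)) ((bms - 1) + 1) 1).any (fun di =>
    (PySem.List.pyRange (-(bms - 1)) ((bms - 1) + 1) 1).any (fun dj =>
      if di = 0 ∧ dj = 0 then false
      else !pvCheckOutOfBounds (m0 + di, m1 + dj) N M && decide (pvCell board (m0 + di) (m1 + dj) ≠ " ")))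

def CheckCandidateMove_alt (board : List (List String)) (move : Int × Int) (N : Int) (M : Int) (border_max_size : Int) : Bool :=
  if decide (pvCell board move.1 move.2 ≠ " ") then false
  else pvScanB board move.1 move.2 N M border_max_size

-- ===== PRECONDITION & SPEC =====
def pvCellIn (board : List (List String)) (i : Int) (j : Int) : Bool :=
  match PySem.List.pyGet? board i with
  | some row => (PySem.List.pyGet? row j).isSome
  | none => false

-- Pre_ excludes inputs where some scanned cell passing the N/M bounds test lies outside the
-- actual board: there A either raises IndexError or returns True only because its ring-order
-- traversal reaches a piece before the raising cell — an artefact of traversal order on which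
-- B's different order may raise instead.
def Pre_CheckCandidateMove (board : List (List String)) (move : Int × Int) (N : Int) (M : Int) (border_max_size : Int) : Prop :=
  pvCellIn board move.1 move.2 = true ∧
  (pvCell board move.1 move.2 = " " →
    ∀ i ∈ PySem.List.pyRange (move.1 - (border_max_size - 1)) (move.1 + border_max_size) 1,
      ∀ j ∈ PySem.List.pyRange (move.2 - (border_max_size - 1)) (move.2 + border_max_size) 1,
        0 ≤ i → i < N → 0 ≤ j → j < M → pvCellIn board i j = true)
instance (board : List (List String)) (move : Int × Int) (N : Int) (M : Int) (border_max_size : Int) : Decidable (Pre_CheckCandidateMove board move N M border_max_size) := by unfold Pre_CheckCandidateMove; infer_instance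

def pvWitness_CheckCandidateMove : List (List String) × (Int × Int) × Int × Int × Int :=
  ([[" ", " "], ["x", " "]], (0, 0), 2, 2, 2)

def Spec_CheckCandidateMove (board : List (List String)) (move : Int × Int) (N : Int) (M : Int) (border_max_size : Int) (out : Bool) : Prop := out = CheckCandidateMove_alt board move N M border_max_size
instance (board : List (List String)) (move : Int × Int) (N : Int) (M : Int) (border_max_size : Int) (out : Bool) : Decidable (Spec_CheckCandidateMove board move N M border_max_size out) := by unfold Spec_CheckCandidateMove; infer_instance

-- ===== CLAIM (what is proved, stated in full; the proofs are below) =====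
def Claim_equal_CheckCandidateMove : Prop := ∀ (board : List (List String)) (move : Int × Int) (N : Int) (M : Int) (border_max_size : Int), Dom_CheckCandidateMove board move N M border_max_size → Pre_CheckCandidateMove board move N M border_max_size → Spec_CheckCandidateMove board move N M border_max_size (CheckCandidateMove board move N M border_max_size)

-- ===== LEMMAS AND PROOFS =====

-- the common characterisation: a non-centre cell of the solid square of radius bms-1
-- that is in bounds and non-empty
def pvHit (board : List (List String)) (m0 m1 N M bms : Int) : Prop :=
  ∃ i j : Int, ¬(i = m0 ∧ j = m1) ∧
    m0 - (bms - 1) ≤ i ∧ i ≤ m0 + (bms - 1) ∧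
    m1 - (bms - 1) ≤ j ∧ j ≤ m1 + (bms - 1) ∧
    pvCheckOutOfBounds (i, j) N M = false ∧ pvCell board i j ≠ " "

theorem pvScanA_iff (board : List (List String)) (m0 m1 N M bms : Int) :
    pvScanA board m0 m1 N M bms = true ↔ pvHit board m0 m1 N M bms := by
  unfold pvScanA pvHit
  simp only [List.any_eq_true, PySem.List.mem_pyRange_one, Bool.or_eq_true,
    Bool.and_eq_true, Bool.not_eq_eq_eq_not, Bool.not_true, decide_eq_true_eq,
    List.mem_cons, List.not_mem_nil]
  constructor
  · rintro ⟨b, ⟨hb1, hb2⟩, hcase⟩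
    rcases hcase with ⟨i, hi, d, hd, hoob, hcell⟩ | ⟨j, hj, d, hd, hoob, hcell⟩
    · rcases hd with rfl | rfl | h
      · exact ⟨i, m1 + -1 * b, by omega, by omega, by omega, by omega, by omega, hoob, hcell⟩
      · exact ⟨i, m1 + 1 * b, by omega, by omega, by omega, by omega, by omega, hoob, hcell⟩
      · cases h
    · rcases hd with rfl | rfl | h
      · exact ⟨m0 + -1 * b, j, by omega, by omega, by omega, by omega, by omega, hoob, hcell⟩
      · exact ⟨m0 + 1 * b, j, by omega, by omega, by omega, by omega, by omega, hoob, hcell⟩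
      · cases h
  · rintro ⟨i, j, hne, h1, h2, h3, h4, hoob, hcell⟩
    by_cases hv : (i - m0).natAbs ≤ (j - m1).natAbs
    · -- found on a vertical edge of ring b = |j - m1|
      refine ⟨((j - m1).natAbs : Int), ⟨by omega, by omega⟩, Or.inl ⟨i, ⟨by omega, by omega⟩, ?_⟩⟩
      by_cases hs : m1 ≤ j
      · have he : m1 + 1 * ((j - m1).natAbs : Int) = j := by omega
        exact ⟨1, by tauto, by rw [he]; exact hoob, by rw [he]; exact hcell⟩
      · have he : m1 + -1 * ((j - m1).natAbs : Int) = j := by omega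
        exact ⟨-1, by tauto, by rw [he]; exact hoob, by rw [he]; exact hcell⟩
    · -- found on a horizontal edge of ring b = |i - m0|
      refine ⟨((i - m0).natAbs : Int), ⟨by omega, by omega⟩, Or.inr ⟨j, ⟨by omega, by omega⟩, ?_⟩⟩
      by_cases hs : m0 ≤ i
      · have he : m0 + 1 * ((i - m0).natAbs : Int) = i := by omega
        exact ⟨1, by tauto, by rw [he]; exact hoob, by rw [he]; exact hcell⟩
      · have he : m0 + -1 * ((i - m0).natAbs : Int) = i := by omega
        exact ⟨-1, by tauto, by rw [he]; exact hoob, by rw [he]; exact hcell⟩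

theorem pvScanB_iff (board : List (List String)) (m0 m1 N M bms : Int) :
    pvScanB board m0 m1 N M bms = true ↔ pvHit board m0 m1 N M bms := by
  unfold pvScanB pvHit
  simp only [List.any_eq_true, PySem.List.mem_pyRange_one]
  constructor
  · rintro ⟨di, hdi, dj, hdj, h⟩
    by_cases h0 : di = 0 ∧ dj = 0
    · rw [if_pos h0] at h; cases h
    · rw [if_neg h0] at h
      simp only [Bool.and_eq_true, Bool.not_eq_eq_eq_not, Bool.not_true,
        decide_eq_true_eq] at h
      exact ⟨m0 + di, m1 + dj, by omega, by omega, by omega, by omega, by omega,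
        h.1, h.2⟩
  · rintro ⟨i, j, hne, h1, h2, h3, h4, hoob, hcell⟩
    refine ⟨i - m0, ⟨by omega, by omega⟩, j - m1, ⟨by omega, by omega⟩, ?_⟩
    rw [if_neg (by omega)]
    have hi : m0 + (i - m0) = i := by omega
    have hj : m1 + (j - m1) = j := by omega
    rw [hi, hj]
    simp [hoob, hcell]

theorem pvScan_eq (board : List (List String)) (m0 m1 N M bms : Int) :
    pvScanA board m0 m1 N M bms = pvScanB board m0 m1 N M bms := by
  rw [Bool.eq_iff_iff, pvScanA_iff, pvScanB_iff]

-- ===== VERDICT (by name: the statement is the Claim_ definition above) =====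
theorem CheckCandidateMove_spec : Claim_equal_CheckCandidateMove := by
  intro board move N M bms _ _
  show CheckCandidateMove board move N M bms = CheckCandidateMove_alt board move N M bms
  unfold CheckCandidateMove CheckCandidateMove_alt
  split_ifs with h
  · rfl
  · exact pvScan_eq board move.1 move.2 N M bms
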